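-- pv_equiv track=rewrite | github.com/Das-rebel/ChuckleNet | convert_scraped_to_word_level.py | apply_context_token_policy
-- ===== SOURCE A (Python) =====
-- from typing import Dict, List, Optional, Tuple
--
-- def is_punctuation_token(token: str) -> bool:
--     return bool(token) and all(not char.isalnum() for char in token)
--
-- def extract_last_non_empty_clause_tokens(context_words: List[str]) -> List[str]:
--     clause_tokens: List[List[str]] = [[]]
--     for token in context_words:
--         if is_punctuation_token(token):
--             clause_tokens.append([])
--             continue
--         clause_tokens[-1].append(token)
--     non_empty = [clause for clause in clause_tokens if clause]
--     return list(non_empty[-1]) if non_empty else []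
--
-- def apply_context_token_policy(
--     context_words: List[str],
--     policy: str,
--     context_tail_tokens: int,
-- ) -> List[str]:
--     if policy == "full":
--         return list(context_words)
--     if policy == "lexical_tail":
--         lexical_words = [word for word in context_words if not is_punctuation_token(word)]
--     elif policy == "clause_lexical_tail":
--         lexical_words = extract_last_non_empty_clause_tokens(context_words)
--     else:
--         raise ValueError(f"Unsupported context token policy: {policy}")
--     if context_tail_tokens <= 0:
--         return []
--     return lexical_words[-context_tail_tokens:]
-- ===== SOURCE B (Python) =====
-- def is_punctuation_token(token: str) -> bool:
--     return token != "" and not any(ch.isalnum() for ch in token)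
--
--
-- def apply_context_token_policy(context_words, policy, context_tail_tokens):
--     if policy == "full":
--         return list(context_words)
--     if policy not in ("lexical_tail", "clause_lexical_tail"):
--         raise ValueError(f"Unsupported context token policy: {policy}")
--     if context_tail_tokens <= 0:
--         return []
--     out = []
--     if policy == "lexical_tail":
--         # backward scan: collect the last context_tail_tokens non-punctuation tokens
--         for token in reversed(context_words):
--             if not is_punctuation_token(token):
--                 out.append(token)
--                 if len(out) == context_tail_tokens:
--                     break
--     else:
--         # backward scan: skip trailing punctuation, then take the run of
--         # non-punctuation tokens (the last non-empty clause), keep at most the tail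
--         i = len(context_words) - 1
--         while i >= 0 and is_punctuation_token(context_words[i]):
--             i -= 1
--         while i >= 0 and not is_punctuation_token(context_words[i]):
--             out.append(context_words[i])
--             i -= 1
--         out = out[:context_tail_tokens]
--     out.reverse()
--     return out
-- ===== Notes on version B (the rewrite author's own statement) =====
-- stated objective: alternative
-- what changed: The clause branch no longer builds a list of all clauses and filters empties: B does a single backward scan (skip trailing punctuation, take the run of non-punctuation tokens), and the lexical_tail branch scans backward collecting only the tokens the tail needs instead of filtering the whole list and slicing.
import Mathlib
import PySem

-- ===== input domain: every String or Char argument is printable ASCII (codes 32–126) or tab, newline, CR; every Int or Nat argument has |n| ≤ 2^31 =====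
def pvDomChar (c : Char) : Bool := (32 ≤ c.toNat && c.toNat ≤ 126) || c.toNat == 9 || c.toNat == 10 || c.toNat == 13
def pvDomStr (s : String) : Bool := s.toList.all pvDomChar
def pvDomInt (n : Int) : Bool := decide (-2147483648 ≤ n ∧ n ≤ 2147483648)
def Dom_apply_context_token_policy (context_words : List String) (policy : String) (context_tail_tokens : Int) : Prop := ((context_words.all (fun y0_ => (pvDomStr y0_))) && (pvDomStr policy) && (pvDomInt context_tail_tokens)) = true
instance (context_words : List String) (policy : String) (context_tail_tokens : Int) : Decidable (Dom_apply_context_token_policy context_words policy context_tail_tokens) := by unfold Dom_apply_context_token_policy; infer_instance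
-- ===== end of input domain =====

-- B replaces A's build-all-clauses-then-filter extraction by a single backward scan
-- (skip trailing punctuation, take the run of non-punctuation tokens) and collects
-- only the needed tail in the lexical_tail branch; objective: alternative decomposition.

-- ===== PORT A =====
-- is_punctuation_token: bool(token) and all(not char.isalnum() for char in token)
-- (Chars.isalnum is exact on the ASCII domain)
def pvIsPunct (token : String) : Bool :=
  decide (token ≠ "") && token.toList.all (fun c => !PySem.Chars.isalnum c)

-- body of the for-loop in extract_last_non_empty_clause_tokens
def pvClauseStep (cs : List (List String)) (token : String) : List (List String) :=
  if pvIsPunct token then cs ++ [[]]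
  else cs.dropLast ++ [cs.getLastD [] ++ [token]]

def pvExtractLast (context_words : List String) : List String :=
  let clause_tokens := context_words.foldl pvClauseStep [[]]
  let non_empty := clause_tokens.filter (fun c => !c.isEmpty)
  non_empty.getLastD []

def apply_context_token_policy (context_words : List String) (policy : String) (context_tail_tokens : Int) : List String :=
  if policy == "full" then context_words
  else
    let lexical_words :=
      if policy == "lexical_tail" then context_words.filter (fun w => !pvIsPunct w)
      else if policy == "clause_lexical_tail" then pvExtractLast context_words
      else []  -- Python raises ValueError here; excluded by Pre_
    if context_tail_tokens ≤ 0 then []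
    else PySem.List.slice lexical_words (some (-context_tail_tokens)) none

-- ===== PORT B =====
-- token != "" and not any(ch.isalnum() for ch in token)
def pvIsPunctB (token : String) : Bool :=
  decide (token ≠ "") && !(token.toList.any (fun c => PySem.Chars.isalnum c))

-- the 'for token in reversed(...)' loop with early break at n collected tokens
def pvCollectTail (n : Int) (acc : List String) : List String → List String
  | [] => acc
  | t :: rest =>
    if !pvIsPunctB t then
      let acc' := acc ++ [t]
      if (acc'.length : Int) == n then acc' else pvCollectTail n acc' rest
    else pvCollectTail n acc rest

-- first while loop: skip trailing (here: leading, list reversed) punctuation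
def pvSkipPunct : List String → List String
  | [] => []
  | t :: rest => if pvIsPunctB t then pvSkipPunct rest else t :: rest

-- second while loop: collect the run of non-punctuation tokens
def pvTakeRun : List String → List String
  | [] => []
  | t :: rest => if !pvIsPunctB t then t :: pvTakeRun rest else []

def apply_context_token_policy_alt (context_words : List String) (policy : String) (context_tail_tokens : Int) : List String :=
  if policy == "full" then context_words
  else if !(policy == "lexical_tail") && !(policy == "clause_lexical_tail") then []  -- ValueError; excluded by Pre_
  else if context_tail_tokens ≤ 0 then []
  else if policy == "lexical_tail" then
    (pvCollectTail context_tail_tokens [] context_words.reverse).reverse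
  else
    ((pvTakeRun (pvSkipPunct context_words.reverse)).take context_tail_tokens.toNat).reverse

-- ===== PRECONDITION & SPEC =====
-- Pre_ excludes exactly the policies on which A raises ValueError (B raises the same error).
def Pre_apply_context_token_policy (context_words : List String) (policy : String) (context_tail_tokens : Int) : Prop :=
  policy = "full" ∨ policy = "lexical_tail" ∨ policy = "clause_lexical_tail"
instance (context_words : List String) (policy : String) (context_tail_tokens : Int) : Decidable (Pre_apply_context_token_policy context_words policy context_tail_tokens) := by unfold Pre_apply_context_token_policy; infer_instance

def pvWitness_apply_context_token_policy : List String × String × Int := (["hi", ".", "a"], "clause_lexical_tail", 2)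

def Spec_apply_context_token_policy (context_words : List String) (policy : String) (context_tail_tokens : Int) (out : List String) : Prop := out = apply_context_token_policy_alt context_words policy context_tail_tokens
instance (context_words : List String) (policy : String) (context_tail_tokens : Int) (out : List String) : Decidable (Spec_apply_context_token_policy context_words policy context_tail_tokens out) := by unfold Spec_apply_context_token_policy; infer_instance

-- ===== CLAIM (what is proved, stated in full; the proofs are below) =====
def Claim_equal_apply_context_token_policy : Prop := ∀ (context_words : List String) (policy : String) (context_tail_tokens : Int), Dom_apply_context_token_policy context_words policy context_tail_tokens → Pre_apply_context_token_policy context_words policy context_tail_tokens → Spec_apply_context_token_policy context_words policy context_tail_tokens (apply_context_token_policy context_words policy context_tail_tokens)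

-- ===== LEMMAS AND PROOFS =====

theorem pv_not_any (f : Char → Bool) (l : List Char) : (!l.any f) = l.all (fun c => !f c) := by
  induction l with
  | nil => rfl
  | cons c rest ih => simp [List.any_cons, List.all_cons, ← ih]

theorem pvIsPunctB_eq (t : String) : pvIsPunctB t = pvIsPunct t := by
  simp only [pvIsPunct, pvIsPunctB, pv_not_any]

-- Python's xs[-n:] for n > 0, written as take-from-the-reverse
theorem pv_slice_tail {α : Type} (l : List α) (n : Int) (hn : 0 < n) :
    PySem.List.slice l (some (-n)) none = (l.reverse.take n.toNat).reverse := by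
  have h : n = ((n.toNat : Nat) : Int) := by omega
  rw [h, PySem.List.slice_from_neg_natCast l n.toNat (by omega)]
  simp only [List.take_reverse, List.reverse_reverse, Int.toNat_natCast]

theorem pvCollectTail_eq (n : Int) (l acc : List String) (h : (acc.length : Int) < n) :
    pvCollectTail n acc l = acc ++ (l.filter (fun t => !pvIsPunctB t)).take (n.toNat - acc.length) := by
  induction l generalizing acc with
  | nil => simp [pvCollectTail]
  | cons t rest ih =>
    simp only [pvCollectTail]
    by_cases hp : pvIsPunctB t
    · simp [hp, ih acc h]
    · simp only [hp, Bool.not_false, if_true, List.filter_cons, Bool.not_true]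
      by_cases he : ((acc.length + 1 : Nat) : Int) = n
      · have : n.toNat - acc.length = 1 := by omega
        simp [he, this]
      · have h' : ((acc ++ [t]).length : Int) < n := by simp; omega
        rw [if_neg (by simpa using he), ih (acc ++ [t]) h']
        have : n.toNat - acc.length = (n.toNat - (acc ++ [t]).length) + 1 := by simp; omega
        simp [this, List.take_succ_cons]

theorem pvSkipPunct_eq (l : List String) : pvSkipPunct l = l.dropWhile pvIsPunctB := by
  induction l with
  | nil => rfl
  | cons t rest ih =>
    simp only [pvSkipPunct, List.dropWhile_cons]
    by_cases hp : pvIsPunctB t <;> simp [hp, ih]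

theorem pvTakeRun_eq (l : List String) : pvTakeRun l = l.takeWhile (fun t => !pvIsPunct t) := by
  induction l with
  | nil => rfl
  | cons t rest ih =>
    simp only [pvTakeRun, List.takeWhile_cons, pvIsPunctB_eq]
    by_cases hp : pvIsPunct t <;> simp [hp, ih]

-- characterization of A's clause fold: the current clause is the reversed run of
-- non-punctuation tokens at the end, and the last non-empty clause is the reversed
-- run after the trailing punctuation
theorem pv_fold_char (cw : List String) :
    (cw.foldl pvClauseStep [[]]).getLastD [] = ((cw.reverse.takeWhile (fun t => !pvIsPunct t)).reverse : List String)
    ∧ ((cw.foldl pvClauseStep [[]]).filter (fun c => !c.isEmpty)).getLastD []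
        = ((cw.reverse.dropWhile pvIsPunct).takeWhile (fun t => !pvIsPunct t)).reverse := by
  induction cw using List.reverseRecOn with
  | nil => simp [pvClauseStep]
  | append_singleton cw t ih =>
    obtain ⟨ih1, ih2⟩ := ih
    rw [List.foldl_append]
    simp only [List.foldl_cons, List.foldl_nil, pvClauseStep, List.reverse_append,
      List.reverse_singleton, List.singleton_append]
    by_cases hp : pvIsPunct t
    · rw [if_pos hp]
      refine ⟨?_, ?_⟩
      · rw [List.getLastD_concat, List.takeWhile_cons]
        simp [hp]
      · rw [List.filter_append, List.dropWhile_cons]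
        simp only [hp, if_true, List.filter_cons, List.filter_nil, List.isEmpty_nil,
          Bool.not_true, Bool.false_eq_true, if_false, List.append_nil]
        exact ih2
    · rw [if_neg hp]
      refine ⟨?_, ?_⟩
      · rw [List.getLastD_concat, ih1, List.takeWhile_cons]
        simp [hp]
      · rw [List.filter_append,
          show List.filter (fun c => !c.isEmpty) [(cw.foldl pvClauseStep [[]]).getLastD [] ++ [t]]
              = [(cw.foldl pvClauseStep [[]]).getLastD [] ++ [t]] from by simp,
          List.getLastD_concat, ih1]
        simp [List.dropWhile_cons, hp]

theorem pvExtractLast_eq (cw : List String) :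
    pvExtractLast cw = (pvTakeRun (pvSkipPunct cw.reverse)).reverse := by
  rw [pvTakeRun_eq, pvSkipPunct_eq, show pvIsPunctB = pvIsPunct from funext pvIsPunctB_eq]
  exact (pv_fold_char cw).2

-- ===== VERDICT (by name: the statement is the Claim_ definition above) =====
theorem apply_context_token_policy_spec : Claim_equal_apply_context_token_policy := by
  intro cw policy n _ hpre
  unfold Spec_apply_context_token_policy
  unfold apply_context_token_policy apply_context_token_policy_alt
  rcases hpre with h | h | h <;> subst h
  · rfl
  · by_cases hn : n ≤ 0
    · simp [hn]
    · rw [pvCollectTail_eq n cw.reverse [] (by simp; omega)]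
      simp only [List.nil_append]
      simp [hn]
      rw [pv_slice_tail _ n (by omega)]
      simp [pvIsPunctB_eq]
  · by_cases hn : n ≤ 0
    · simp [hn]
    · simp only [pvExtractLast_eq]
      simp [hn]
      rw [pv_slice_tail _ n (by omega)]
      simp
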